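-- pv_equiv track=rewrite | github.com/Soorya-Ray/Indipoll | forecast-service/model.py | _group_rows_by_station
-- ===== SOURCE A (Python) =====
-- def _group_rows_by_station(rows: list[dict]) -> dict[str, list]:
--     grouped: dict[str, list] = {}
--     for row in rows:
--         slug = row.get("station_slug") or row.get("station_id") or ""
--         if not slug:
--             continue
--         grouped.setdefault(slug, []).append(row)
--
--     for slug in grouped:
--         grouped[slug].sort(key=lambda r: r.get("observed_at", ""))
--
--     return grouped
-- ===== SOURCE B (Python) =====
-- def _group_rows_by_station(rows: list[dict]) -> dict[str, list]:
--     slugs: list[str] = []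
--     for row in rows:
--         s = row.get("station_slug") or row.get("station_id") or ""
--         if s and s not in slugs:
--             slugs.append(s)
--     return {
--         s: sorted(
--             (r for r in rows
--              if (r.get("station_slug") or r.get("station_id") or "") == s),
--             key=lambda r: r.get("observed_at", ""),
--         )
--         for s in slugs
--     }
-- ===== Notes on version B (the rewrite author's own statement) =====
-- stated objective: alternative
-- what changed: B first collects the distinct nonempty slugs in first-appearance order, then builds the result as a dict comprehension that, per slug, filters the rows and sorts that group once; A instead accumulates groups with setdefault/append and sorts each in place.
import Mathlib
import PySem

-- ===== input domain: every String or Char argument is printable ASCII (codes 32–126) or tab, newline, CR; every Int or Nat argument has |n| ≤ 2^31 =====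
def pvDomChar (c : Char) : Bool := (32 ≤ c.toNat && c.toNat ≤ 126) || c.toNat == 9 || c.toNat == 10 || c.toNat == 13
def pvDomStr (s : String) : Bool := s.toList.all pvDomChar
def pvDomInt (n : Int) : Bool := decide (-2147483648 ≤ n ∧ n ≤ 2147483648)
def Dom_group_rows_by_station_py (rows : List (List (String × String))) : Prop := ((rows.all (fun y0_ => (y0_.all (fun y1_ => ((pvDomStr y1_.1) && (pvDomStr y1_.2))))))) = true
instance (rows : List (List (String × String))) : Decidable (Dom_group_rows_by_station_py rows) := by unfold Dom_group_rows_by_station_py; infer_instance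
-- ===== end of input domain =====

-- B collects the distinct nonempty slugs first, then builds each group by filtering the rows for
-- that slug and sorting it once (a dict comprehension), instead of A's setdefault/append
-- accumulation followed by per-group in-place sorts; same result, similar cost.

-- shared helper: slug = row.get("station_slug") or row.get("station_id") or ""
def pvSlug (row : List (String × String)) : String :=
  let s := (PySem.Dict.mk row).getD "station_slug" ""
  if s ≠ "" then s else (PySem.Dict.mk row).getD "station_id" ""

-- shared helper: the sort key  r.get("observed_at", "")
def pvObs (row : List (String × String)) : String :=
  (PySem.Dict.mk row).getD "observed_at" ""

-- ===== PORT A =====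
def group_rows_by_station_py (rows : List (List (String × String))) : List (String × List (List (String × String))) :=
  let grouped := rows.foldl
    (fun (g : PySem.Dict String (List (List (String × String)))) row =>
      let slug := pvSlug row
      if slug = "" then g                     -- continue
      else g.modify slug [] (fun v => v ++ [row]))  -- grouped.setdefault(slug, []).append(row)
    PySem.Dict.empty
  -- for slug in grouped: grouped[slug].sort(key=lambda r: r.get("observed_at", ""))
  grouped.items.map (fun kv => (kv.1, PySem.List.sorted kv.2 pvObs))

-- ===== PORT B =====
-- the first loop of Source B: if s and s not in slugs: slugs.append(s)
def pvCollectSlugs : List (List (String × String)) → List String → List String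
  | [], acc => acc
  | row :: rest, acc =>
      let s := pvSlug row
      pvCollectSlugs rest (if s ≠ "" ∧ ¬ acc.contains s then acc ++ [s] else acc)

def group_rows_by_station_py_alt (rows : List (List (String × String))) : List (String × List (List (String × String))) :=
  -- {s: sorted((r for r in rows if slug(r) == s), key=obs) for s in slugs}
  (pvCollectSlugs rows []).map (fun s =>
    (s, PySem.List.sorted (rows.filter (fun r => pvSlug r == s)) pvObs))

-- ===== PRECONDITION & SPEC =====
def Spec_group_rows_by_station_py (rows : List (List (String × String))) (out : List (String × List (List (String × String)))) : Prop := out = group_rows_by_station_py_alt rows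
instance (rows : List (List (String × String))) (out : List (String × List (List (String × String)))) : Decidable (Spec_group_rows_by_station_py rows out) := by unfold Spec_group_rows_by_station_py; infer_instance

-- ===== CLAIM (what is proved, stated in full; the proofs are below) =====
def Claim_equal_group_rows_by_station_py : Prop := ∀ (rows : List (List (String × String))), Dom_group_rows_by_station_py rows → Spec_group_rows_by_station_py rows (group_rows_by_station_py rows)

-- ===== LEMMAS AND PROOFS =====

-- a fold guarded by "skip empty slugs" is a fold over the filtered list
lemma pvFoldl_guard {β γ : Type} (f : γ → β → γ) (key : β → String) (l : List β) (d : γ) :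
    l.foldl (fun g r => if key r = "" then g else f g r) d
      = (l.filter (fun r => key r ≠ "")).foldl f d := by
  induction l generalizing d with
  | nil => rfl
  | cons r t ih => by_cases h : key r = "" <;> simp [h, ih]

-- B's slug-collection loop is the guarded Set.add fold
lemma pvCollectSlugs_eq (l : List (List (String × String))) (acc : List String) :
    pvCollectSlugs l acc
      = l.foldl (fun a r => if pvSlug r = "" then a else PySem.Set.add a (pvSlug r)) acc := by
  induction l generalizing acc with
  | nil => rfl
  | cons r t ih =>
    rw [pvCollectSlugs, List.foldl_cons, ih]
    congr 1
    by_cases h : pvSlug r = ""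
    · simp [h]
    · by_cases hc : acc.contains (pvSlug r) <;>
        simp [h, hc, PySem.Set.add, PySem.Set.contains, List.contains_eq_mem] at *

theorem group_rows_by_station_py_spec_aux (rows : List (List (String × String))) :
    group_rows_by_station_py rows = group_rows_by_station_py_alt rows := by
  unfold group_rows_by_station_py group_rows_by_station_py_alt
  dsimp only []
  rw [pvFoldl_guard
        (fun (g : PySem.Dict String (List (List (String × String)))) r =>
          g.modify (pvSlug r) [] (fun v => v ++ [r])) pvSlug rows PySem.Dict.empty,
      pvCollectSlugs_eq,
      pvFoldl_guard (fun (a : List String) r => PySem.Set.add a (pvSlug r)) pvSlug rows []]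
  set rowsF := rows.filter (fun r => pvSlug r ≠ "") with hrowsF
  set dA := rowsF.foldl (fun g r => g.modify (pvSlug r) [] (fun v => v ++ [r]))
      PySem.Dict.empty with hdA
  set S := PySem.Set.ofList (rowsF.map pvSlug) with hS
  -- B's slug list is exactly S
  have hslugs : rowsF.foldl (fun a r => PySem.Set.add a (pvSlug r)) [] = S := by
    rw [hS, PySem.Set.ofList_eq_foldl, List.foldl_map]
  -- keys of the A-side dict
  have hAkeys : dA.keys = S := by
    rw [hdA, PySem.Dict.keys_foldl_modify_key rowsF pvSlug [] (fun _ r v => v ++ [r])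
          PySem.Dict.empty,
        PySem.Dict.keys_empty, PySem.Set.update_nil_left, hS]
  have hnodA : dA.keys.Nodup := by rw [hAkeys, hS]; exact PySem.Set.nodup_ofList _
  -- every element of S is a nonempty slug of some kept row
  have hSmem : ∀ k ∈ S, k ≠ "" := by
    intro k hk
    rw [hS] at hk
    rcases List.mem_map.mp ((PySem.Set.mem_ofList _ _).mp hk) with ⟨r, hr, hrk⟩
    rcases List.mem_filter.mp hr with ⟨-, hne⟩
    exact hrk ▸ (by simpa using hne)
  -- values of the A-side dict
  have hAgetD : ∀ k, dA.getD k [] = rowsF.filter (fun r => pvSlug r == k) := by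
    intro k
    rw [hdA, show rowsF.foldl (fun g r => g.modify (pvSlug r) [] (fun v => v ++ [r]))
          PySem.Dict.empty
        = (rowsF.map (fun r => (pvSlug r, r))).foldl
            (fun d p => d.modify p.1 [] (fun v => v ++ [p.2])) PySem.Dict.empty from
          (List.foldl_map (f := fun r => (pvSlug r, r))
            (g := fun d p => d.modify p.1 [] (fun v => v ++ [p.2]))
            (l := rowsF) (init := PySem.Dict.empty)).symm,
        PySem.Dict.getD_foldl_modify_append, PySem.Dict.getD_empty, List.nil_append,
        List.filter_map, List.map_map]
    simp [Function.comp_def]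
  rw [hslugs, PySem.Dict.items_eq_map_keys dA hnodA [], hAkeys, List.map_map]
  apply List.map_congr_left
  intro k hk
  have hkne : k ≠ "" := hSmem k hk
  simp only [Function.comp_def, hAgetD]
  -- for k ≠ "", filtering the kept rows for slug k = filtering all rows for slug k
  rw [hrowsF, List.filter_filter]
  congr 1
  congr 1
  apply List.filter_congr
  intro r _
  by_cases h : pvSlug r = k
  · simp [h, hkne]
  · simp [h]

-- ===== VERDICT (by name: the statement is the Claim_ definition above) =====
theorem group_rows_by_station_py_spec : Claim_equal_group_rows_by_station_py := by
  intro rows _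
  exact group_rows_by_station_py_spec_aux rows
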